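-- pv_equiv track=rewrite | github.com/OWASP/Nettacker | nettacker/core/parser.py | parse_excluded
-- ===== SOURCE A (Python) =====
-- def parse_excluded(line):
--     line=line.strip()
--     if not line:
--         return []
--     if(line.startswith("Exclude")):
--         line = line[len("Exclude"):].strip()
--     if not line:
--         return []
--     parts = [p.strip() for p in line.split(",") if p.strip()]
--     tcp_spec =[]
--     udp_spec =[]
--     universal_spec=[]
--     for p in parts:
--         if(":" in p):
--             proto,spec = p.split(":",1)
--             proto = proto.upper()
--         else :
--             proto,spec = "",p
--
--         if proto == "T":
--             tcp_spec.append(spec)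
--         elif proto == "U":
--             udp_spec.append(spec)
--         else :
--             universal_spec.append(spec)
--     return {
--         "TCP": ",".join(tcp_spec),
--         "UDP": ",".join(udp_spec),
--         "Universal": ",".join(universal_spec),
--     }
-- ===== SOURCE B (Python) =====
-- def parse_excluded(line):
--     line = line.strip()
--     if not line:
--         return []
--     if line.startswith("Exclude"):
--         line = line[len("Exclude"):].strip()
--     if not line:
--         return []
--     parts = [p.strip() for p in line.split(",") if p.strip()]
--     pairs = []
--     for p in parts:
--         if ":" in p:
--             proto, spec = p.split(":", 1)
--             pairs.append((proto.upper(), spec))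
--         else:
--             pairs.append(("", p))
--     return {
--         "TCP": ",".join(s for pr, s in pairs if pr == "T"),
--         "UDP": ",".join(s for pr, s in pairs if pr == "U"),
--         "Universal": ",".join(s for pr, s in pairs if pr != "T" and pr != "U"),
--     }
-- ===== Notes on version B (the rewrite author's own statement) =====
-- stated objective: alternative
-- what changed: B replaces A's single dispatch loop with three mutating accumulator lists by one tagging pass producing (proto, spec) tuples followed by three independent filter passes (TCP, UDP, Universal = complement).
import Mathlib
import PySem

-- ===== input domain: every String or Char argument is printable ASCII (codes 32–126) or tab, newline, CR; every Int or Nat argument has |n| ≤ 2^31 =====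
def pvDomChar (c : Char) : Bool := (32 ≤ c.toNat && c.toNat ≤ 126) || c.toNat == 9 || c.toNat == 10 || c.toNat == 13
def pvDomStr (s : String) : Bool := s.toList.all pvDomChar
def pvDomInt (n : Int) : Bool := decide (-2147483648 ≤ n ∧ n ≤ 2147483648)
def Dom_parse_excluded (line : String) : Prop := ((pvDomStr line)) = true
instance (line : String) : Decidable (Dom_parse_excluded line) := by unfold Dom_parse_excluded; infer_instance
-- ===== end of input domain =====

-- B restructures A's one dispatch loop (three mutating accumulators) into a tagging pass
-- producing (proto, spec) tuples followed by three independent filter passes; same cost.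

-- ===== PORT A =====
-- shared transliteration of the identical per-part code in A and B:
-- 'proto,spec = p.split(":",1); proto = proto.upper()' when ':' in p, else ('', p)
def pvTag (p : String) : String × String :=
  if PySem.Str.isIn ":" p then
    let ps := (PySem.Str.splitMax? p ":" 1).getD []
    (PySem.Str.upper (ps.getD 0 ""), ps.getD 1 "")
  else ("", p)

def parse_excluded (line : String) : List (String × String) :=
  let line := PySem.Str.strip line
  if line == "" then []
  else
    let line := if PySem.Str.startswith line "Exclude"
                then PySem.Str.strip (PySem.Str.slice line (some 7) none) else line
    if line == "" then []
    else
      let parts := (((PySem.Str.split? line ",").getD []).map PySem.Str.strip).filter (· ≠ "")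
      let st := parts.foldl (fun (st : List String × List String × List String) p =>
        let q := pvTag p
        if q.1 == "T" then (st.1 ++ [q.2], st.2.1, st.2.2)
        else if q.1 == "U" then (st.1, st.2.1 ++ [q.2], st.2.2)
        else (st.1, st.2.1, st.2.2 ++ [q.2])) ([], [], [])
      [("TCP", PySem.Str.join "," st.1),
       ("UDP", PySem.Str.join "," st.2.1),
       ("Universal", PySem.Str.join "," st.2.2)]

-- ===== PORT B =====
def parse_excluded_alt (line : String) : List (String × String) :=
  let line := PySem.Str.strip line
  if line == "" then []
  else
    let line := if PySem.Str.startswith line "Exclude"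
                then PySem.Str.strip (PySem.Str.slice line (some 7) none) else line
    if line == "" then []
    else
      let parts := (((PySem.Str.split? line ",").getD []).map PySem.Str.strip).filter (· ≠ "")
      let pairs := parts.map pvTag
      [("TCP", PySem.Str.join "," ((pairs.filter (fun q => q.1 == "T")).map (·.2))),
       ("UDP", PySem.Str.join "," ((pairs.filter (fun q => q.1 == "U")).map (·.2))),
       ("Universal", PySem.Str.join "," ((pairs.filter (fun q => q.1 != "T" && q.1 != "U")).map (·.2)))]

-- ===== PRECONDITION & SPEC =====
def Spec_parse_excluded (line : String) (out : List (String × String)) : Prop := out = parse_excluded_alt line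
instance (line : String) (out : List (String × String)) : Decidable (Spec_parse_excluded line out) := by unfold Spec_parse_excluded; infer_instance

-- ===== CLAIM (what is proved, stated in full; the proofs are below) =====
def Claim_equal_parse_excluded : Prop := ∀ (line : String), Dom_parse_excluded line → Spec_parse_excluded line (parse_excluded line)

-- ===== LEMMAS AND PROOFS =====
theorem pvFold_eq (l : List String) (a b c : List String) :
    l.foldl (fun (st : List String × List String × List String) p =>
        let q := pvTag p
        if q.1 == "T" then (st.1 ++ [q.2], st.2.1, st.2.2)
        else if q.1 == "U" then (st.1, st.2.1 ++ [q.2], st.2.2)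
        else (st.1, st.2.1, st.2.2 ++ [q.2])) (a, b, c)
      = (a ++ (((l.map pvTag).filter (fun q => q.1 == "T")).map (·.2)),
         b ++ (((l.map pvTag).filter (fun q => q.1 == "U")).map (·.2)),
         c ++ (((l.map pvTag).filter (fun q => q.1 != "T" && q.1 != "U")).map (·.2))) := by
  induction l generalizing a b c with
  | nil => simp
  | cons p t ih =>
    by_cases hT : (pvTag p).1 == "T"
    · have hT' : (pvTag p).1 = "T" := by simpa using hT
      simp only [List.foldl_cons, List.map_cons, List.filter_cons, hT, if_true, ih]
      simp [hT']
    · have hT' : ¬ (pvTag p).1 = "T" := by simpa using hT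
      by_cases hU : (pvTag p).1 == "U"
      · have hU' : (pvTag p).1 = "U" := by simpa using hU
        simp only [List.foldl_cons, List.map_cons, List.filter_cons, hT, hU, if_true,
          if_false, Bool.false_eq_true, ih]
        simp [hU']
      · have hU' : ¬ (pvTag p).1 = "U" := by simpa using hU
        simp only [List.foldl_cons, List.map_cons, List.filter_cons, hT, hU,
          Bool.false_eq_true, if_false, ih]
        simp [hT', hU']

-- ===== VERDICT (by name: the statement is the Claim_ definition above) =====
theorem parse_excluded_spec : Claim_equal_parse_excluded := by
  intro line _
  unfold Spec_parse_excluded parse_excluded parse_excluded_alt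
  simp only [pvFold_eq, List.nil_append]
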